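-- pv_equiv track=rewrite | github.com/kusaku/aoc2023 | day11/src/main.py | scale_universe
-- ===== SOURCE A (Python) =====
-- def scale_universe(dimensions, galaxy_positions, scale_factor):
--     universe_width, universe_height = dimensions
--
--     def scale_coordinates(coordinates, max_size):
--         mapping = {}
--         scaled_total = 0
--         previous_coordinate = 0
--         for coordinate in coordinates:
--             scaled_total += (coordinate - previous_coordinate) * scale_factor
--             mapping[coordinate] = scaled_total
--             scaled_total += 1
--             previous_coordinate = coordinate + 1
--         scaled_total += (max_size - previous_coordinate) * scale_factor
--
--         return mapping, scaled_total
--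
--     x_coordinates = sorted({x for x, _ in galaxy_positions})
--     y_coordinates = sorted({y for _, y in galaxy_positions})
--
--     x_mapping, scaled_width = scale_coordinates(x_coordinates, universe_width)
--     y_mapping, scaled_height = scale_coordinates(y_coordinates, universe_height)
--
--     scaled_positions = {
--         (x_mapping[x], y_mapping[y]) for x, y in galaxy_positions
--     }
--
--     return (scaled_width, scaled_height), scaled_positions
-- ===== SOURCE B (Python) =====
-- def scale_universe(dimensions, galaxy_positions, scale_factor):
--     width, height = dimensions
--     k = scale_factor - 1
--
--     x_coordinates = sorted({x for x, _ in galaxy_positions})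
--     y_coordinates = sorted({y for _, y in galaxy_positions})
--
--     # closed form: a coordinate c with i occupied coordinates before it has
--     # exactly c - i empty lines below it, each expanded by k extra cells
--     x_mapping = {c: c + (c - i) * k for i, c in enumerate(x_coordinates)}
--     y_mapping = {c: c + (c - i) * k for i, c in enumerate(y_coordinates)}
--
--     scaled_positions = {(x_mapping[x], y_mapping[y]) for x, y in galaxy_positions}
--
--     scaled_width = width + (width - len(x_coordinates)) * k
--     scaled_height = height + (height - len(y_coordinates)) * k
--
--     return (scaled_width, scaled_height), scaled_positions
-- ===== Notes on version B (the rewrite author's own statement) =====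
-- stated objective: simpler
-- what changed: Replaces A's sequential running-total/previous-coordinate accumulator loop in scale_coordinates with an independent per-coordinate closed form c + (c - index)*(scale_factor - 1) over enumerate(sorted coords), and computes the scaled dimensions by the closed form size + (size - len(coords))*(scale_factor - 1).
import Mathlib
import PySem

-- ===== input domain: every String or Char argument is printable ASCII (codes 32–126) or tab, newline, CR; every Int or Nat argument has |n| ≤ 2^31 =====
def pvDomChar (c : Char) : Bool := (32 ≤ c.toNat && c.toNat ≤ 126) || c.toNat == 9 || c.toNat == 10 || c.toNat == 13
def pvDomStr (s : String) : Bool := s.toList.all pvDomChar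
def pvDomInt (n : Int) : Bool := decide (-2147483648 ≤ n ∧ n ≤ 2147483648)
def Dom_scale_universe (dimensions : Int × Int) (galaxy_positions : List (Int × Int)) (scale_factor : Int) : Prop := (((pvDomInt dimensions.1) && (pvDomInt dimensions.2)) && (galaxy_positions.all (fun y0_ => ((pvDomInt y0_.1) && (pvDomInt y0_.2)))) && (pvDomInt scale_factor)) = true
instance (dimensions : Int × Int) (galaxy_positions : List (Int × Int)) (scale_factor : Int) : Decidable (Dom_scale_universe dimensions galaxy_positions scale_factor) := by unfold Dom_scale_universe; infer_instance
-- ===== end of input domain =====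

-- B replaces A's sequential running-total/previous-coordinate loop by an independent
-- per-coordinate closed form (c + (c - index) * (scale_factor - 1)) and computes the
-- scaled sizes by closed form; objective: simpler (same asymptotic cost).

-- ===== PORT A =====
-- A's loop body inside scale_coordinates (state: mapping, scaled_total, previous_coordinate)
def pvStepA (sf : Int) (acc : PySem.Dict Int Int × Int × Int) (c : Int) : PySem.Dict Int Int × Int × Int :=
  let scaled_total := acc.2.1 + (c - acc.2.2) * sf
  (acc.1.insert c scaled_total, scaled_total + 1, c + 1)

-- A's inner helper scale_coordinates (closure over scale_factor passed explicitly)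
def pvScaleA (sf : Int) (coordinates : List Int) (max_size : Int) : PySem.Dict Int Int × Int :=
  let st := coordinates.foldl (pvStepA sf) (PySem.Dict.empty, 0, 0)
  (st.1, st.2.1 + (max_size - st.2.2) * sf)

def scale_universe (dimensions : Int × Int) (galaxy_positions : List (Int × Int)) (scale_factor : Int) : (Int × Int) × (List (Int × Int)) :=
  let universe_width := dimensions.1
  let universe_height := dimensions.2
  let x_coordinates := PySem.List.sorted (PySem.Set.ofList (galaxy_positions.map (fun p => p.1))) (fun x => x) false
  let y_coordinates := PySem.List.sorted (PySem.Set.ofList (galaxy_positions.map (fun p => p.2))) (fun x => x) false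
  let xr := pvScaleA scale_factor x_coordinates universe_width
  let yr := pvScaleA scale_factor y_coordinates universe_height
  -- x_mapping[x] / y_mapping[y]: the key is always present (every galaxy coordinate was
  -- inserted), so getD with default 0 is exact (no KeyError is reachable)
  let scaled_positions := PySem.Set.ofList (galaxy_positions.map (fun p => (xr.1.getD p.1 0, yr.1.getD p.2 0)))
  ((xr.2, yr.2), scaled_positions)

-- ===== PORT B =====
-- B's dict comprehension over enumerate(coords)
def pvMapB (k : Int) (coords : List Int) : PySem.Dict Int Int :=
  (PySem.List.enumerate coords 0).foldl (fun d ic => d.insert ic.2 (ic.2 + (ic.2 - ic.1) * k)) PySem.Dict.empty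

def scale_universe_alt (dimensions : Int × Int) (galaxy_positions : List (Int × Int)) (scale_factor : Int) : (Int × Int) × (List (Int × Int)) :=
  let width := dimensions.1
  let height := dimensions.2
  let k := scale_factor - 1
  let x_coordinates := PySem.List.sorted (PySem.Set.ofList (galaxy_positions.map (fun p => p.1))) (fun x => x) false
  let y_coordinates := PySem.List.sorted (PySem.Set.ofList (galaxy_positions.map (fun p => p.2))) (fun x => x) false
  let x_mapping := pvMapB k x_coordinates
  let y_mapping := pvMapB k y_coordinates
  -- key always present, as in port A
  let scaled_positions := PySem.Set.ofList (galaxy_positions.map (fun p => (x_mapping.getD p.1 0, y_mapping.getD p.2 0)))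
  let scaled_width := width + (width - (x_coordinates.length : Int)) * k
  let scaled_height := height + (height - (y_coordinates.length : Int)) * k
  ((scaled_width, scaled_height), scaled_positions)

-- ===== PRECONDITION & SPEC =====
def Spec_scale_universe (dimensions : Int × Int) (galaxy_positions : List (Int × Int)) (scale_factor : Int) (out : (Int × Int) × (List (Int × Int))) : Prop := out = scale_universe_alt dimensions galaxy_positions scale_factor
instance (dimensions : Int × Int) (galaxy_positions : List (Int × Int)) (scale_factor : Int) (out : (Int × Int) × (List (Int × Int))) : Decidable (Spec_scale_universe dimensions galaxy_positions scale_factor out) := by unfold Spec_scale_universe; infer_instance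

-- ===== CLAIM (what is proved, stated in full; the proofs are below) =====
def Claim_equal_scale_universe : Prop := ∀ (dimensions : Int × Int) (galaxy_positions : List (Int × Int)) (scale_factor : Int), Dom_scale_universe dimensions galaxy_positions scale_factor → Spec_scale_universe dimensions galaxy_positions scale_factor (scale_universe dimensions galaxy_positions scale_factor)

-- ===== LEMMAS AND PROOFS =====
-- final value of A's previous_coordinate accumulator (proof-only helper)
def pvFin : List Int → Int → Int
  | [], p => p
  | c :: cs, _ => pvFin cs (c + 1)

-- A's loop, run from an arbitrary state satisfying its invariant
-- (total = sf*(prev - i) + i after i processed elements), equals B's enumerate fold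
lemma pvFoldAB (sf : Int) : ∀ (L : List Int) (d : PySem.Dict Int Int) (i p : Int),
    L.foldl (pvStepA sf) (d, sf * (p - i) + i, p) =
      ((PySem.List.enumerate L i).foldl (fun d ic => d.insert ic.2 (ic.2 + (ic.2 - ic.1) * (sf - 1))) d,
       sf * (pvFin L p - (i + (L.length : Int))) + (i + (L.length : Int)),
       pvFin L p) := by
  intro L
  induction L with
  | nil => intro d i p; simp [pvFin]
  | cons c cs ih =>
    intro d i p
    simp only [List.foldl_cons, PySem.List.enumerate_cons, pvStepA, pvFin]
    have e1 : sf * (p - i) + i + (c - p) * sf = c + (c - i) * (sf - 1) := by ring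
    rw [e1]
    have e2 : c + (c - i) * (sf - 1) + 1 = sf * ((c + 1) - (i + 1)) + (i + 1) := by ring
    rw [e2, ih]
    refine Prod.ext rfl (Prod.ext ?_ rfl)
    simp only [List.length_cons]
    push_cast
    ring

lemma pvScaleA_eq (sf : Int) (L : List Int) (m : Int) :
    pvScaleA sf L m = (pvMapB (sf - 1) L, m + (m - (L.length : Int)) * (sf - 1)) := by
  unfold pvScaleA pvMapB
  have h0 : ((PySem.Dict.empty : PySem.Dict Int Int), (0 : Int), (0 : Int)) =
      ((PySem.Dict.empty : PySem.Dict Int Int), sf * ((0 : Int) - 0) + 0, (0 : Int)) := by norm_num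
  rw [h0, pvFoldAB]
  refine Prod.ext rfl ?_
  simp only
  ring

-- ===== VERDICT (by name: the statement is the Claim_ definition above) =====
theorem scale_universe_spec : Claim_equal_scale_universe := by
  intro dims gps sf _
  unfold Spec_scale_universe scale_universe scale_universe_alt
  simp only [pvScaleA_eq]
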